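-- pv_equiv track=rewrite | github.com/fazirta/DDP-1 | MON_D_2306274983_MuhammadFazilTirtana_Lab07/lab07.py | cek_keturunan
-- ===== SOURCE A (Python) =====
-- def cek_keturunan(family_tree, parent, child):
--     """
--     Mengecek apakah suatu child merupakan keturunan dari suatu parent, baik secara langsung maupun tidak.
--     Parameters:
--         family_tree (dictionary): data relasi parent dengan list childs
--         parent (string): parent
--         child (string): child
--     Returns:
--         string: pesan berisi apakah suatu child merupakan keturunan dari suatu parent
--     """
--
--     # Jika nama parent dan child sama
--     if parent == child:
--         return f"{child} bukan merupakan keturunan dari {parent}"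
--
--     # Set untuk melacak node yang sudah dikunjungi selama pencarian
--     visited = set()
--
--     # Fungsi rekursif untuk melakukan Depth First Search (DFS)
--     def dfs(current):
--         # Jika node saat ini adalah node child yang dicari dan node terdapat di data family_tree, kembalikan True
--         if current == child and (
--             (current in family_tree.keys())
--             or (current in [j for i in family_tree.values() for j in i])
--         ):
--             return True
--
--         # Tandai node saat ini sebagai sudah dikunjungi
--         visited.add(current)
--
--         # Jika node saat ini memiliki keturunan, rekursi ke setiap keturunan
--         if current in family_tree:
--             for keturunan in family_tree[current]:
--                 # Jika keturunan belum dikunjungi dan merupakan keturunan yang dicari, kembalikan True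
--                 if keturunan not in visited and dfs(keturunan):
--                     return True
--
--         # Jika tidak ada hubungan keturunan ditemukan, kembalikan False
--         return False
--
--     return (
--         f"{child} benar merupakan keturunan dari {parent}"
--         if dfs(parent)
--         else f"{child} bukan merupakan keturunan dari {parent}"
--     )
-- ===== SOURCE B (Python) =====
-- def cek_keturunan(family_tree, parent, child):
--     if parent == child:
--         return f"{child} bukan merupakan keturunan dari {parent}"
--     visited = set()
--     stack = [parent]
--     while stack:
--         current = stack.pop()
--         if current == child:
--             return f"{child} benar merupakan keturunan dari {parent}"
--         if current in visited:
--             continue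
--         visited.add(current)
--         stack.extend(family_tree.get(current, []))
--     return f"{child} bukan merupakan keturunan dari {parent}"
-- ===== Notes on version B (the rewrite author's own statement) =====
-- stated objective: idiomatic
-- what changed: A's nested recursive dfs with a shared mutable visited set is replaced by an iterative traversal with an explicit stack (pop, check, push unvisited children), dropping the redundant keys/values membership test; same messages, same guard.
import Mathlib
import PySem

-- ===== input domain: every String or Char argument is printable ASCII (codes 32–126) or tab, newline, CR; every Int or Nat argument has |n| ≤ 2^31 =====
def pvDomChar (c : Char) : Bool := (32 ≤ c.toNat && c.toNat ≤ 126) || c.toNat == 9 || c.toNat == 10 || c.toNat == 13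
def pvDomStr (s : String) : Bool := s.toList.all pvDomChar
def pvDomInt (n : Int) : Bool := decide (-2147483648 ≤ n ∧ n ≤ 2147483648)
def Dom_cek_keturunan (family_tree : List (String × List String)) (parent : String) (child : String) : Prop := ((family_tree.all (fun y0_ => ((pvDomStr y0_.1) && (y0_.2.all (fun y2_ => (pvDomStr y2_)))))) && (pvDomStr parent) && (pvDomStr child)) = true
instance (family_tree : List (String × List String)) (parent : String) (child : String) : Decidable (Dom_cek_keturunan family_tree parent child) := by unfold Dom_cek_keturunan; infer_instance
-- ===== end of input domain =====

-- B replaces A's nested recursive DFS (a shared mutable visited set threaded through recursion) by an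
-- iterative stack-based traversal (idiomatic, avoids recursion); return values are proved equal.

-- Shared totality bookkeeping for both fuelled loops: the finite universe of names occurring in the input.
def pvUniv (family_tree : List (String × List String)) (parent : String) : List String :=
  PySem.Set.ofList (parent :: (PySem.Dict.mk family_tree).keys ++ ((PySem.Dict.mk family_tree).values).flatten)

-- ===== PORT A =====
-- A's inner `dfs`: returns (result, visited); the Python set `visited` is mutated across sibling calls,
-- so it is threaded through the fold over the children, with the early `return True` kept as the st.1 flag.
-- `fuel` only makes the recursion structural; it is proved below never to run out for the fuel A is called with.
def pvDfsA (family_tree : List (String × List String)) (child : String) :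
    Nat → PySem.Set String → String → Bool × PySem.Set String
  | 0, vis, _ => (false, vis)
  | f+1, vis, cur =>
    if cur = child ∧ ((PySem.Dict.mk family_tree).contains cur = true
        ∨ cur ∈ ((PySem.Dict.mk family_tree).values).flatten) then
      (true, vis)
    else
      let vis1 := PySem.Set.add vis cur
      match (PySem.Dict.mk family_tree).get? cur with
      | some children =>
          children.foldl (fun st k =>
            if st.1 then st
            else if k ∈ st.2 then st
            else pvDfsA family_tree child f st.2 k) (false, vis1)
      | none => (false, vis1)

def cek_keturunan (family_tree : List (String × List String)) (parent : String) (child : String) : String :=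
  if parent = child then child ++ " bukan merupakan keturunan dari " ++ parent
  else if (pvDfsA family_tree child ((pvUniv family_tree parent).length + 1) PySem.Set.empty parent).1 then
    child ++ " benar merupakan keturunan dari " ++ parent
  else
    child ++ " bukan merupakan keturunan dari " ++ parent

-- ===== PORT B =====
-- B's while-loop; the stack is kept with its top at the HEAD, so Python's `stack.pop()` (last element)
-- followed by `stack.extend(children)` is mirrored exactly by pushing `children.reverse` at the head.
def pvLoopB (family_tree : List (String × List String)) (child : String) :
    Nat → PySem.Set String → List String → Bool
  | 0, _, _ => false
  | f+1, vis, stack =>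
    match stack with
    | [] => false
    | cur :: rest =>
      if cur = child then true
      else if cur ∈ vis then pvLoopB family_tree child f vis rest
      else pvLoopB family_tree child f (PySem.Set.add vis cur)
             (((PySem.Dict.mk family_tree).getD cur []).reverse ++ rest)

-- fuel = 1 + Σ_{x ∈ univ} (1 + #children x): an upper bound on the number of loop iterations (proved below).
def pvFuelB (family_tree : List (String × List String)) (parent : String) : Nat :=
  1 + ((pvUniv family_tree parent).map
        (fun x => 1 + ((PySem.Dict.mk family_tree).getD x []).length)).sum

def cek_keturunan_alt (family_tree : List (String × List String)) (parent : String) (child : String) : String :=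
  if parent = child then child ++ " bukan merupakan keturunan dari " ++ parent
  else if pvLoopB family_tree child (pvFuelB family_tree parent) PySem.Set.empty [parent] then
    child ++ " benar merupakan keturunan dari " ++ parent
  else
    child ++ " bukan merupakan keturunan dari " ++ parent

-- ===== PRECONDITION & SPEC =====
def Spec_cek_keturunan (family_tree : List (String × List String)) (parent : String) (child : String) (out : String) : Prop := out = cek_keturunan_alt family_tree parent child
instance (family_tree : List (String × List String)) (parent : String) (child : String) (out : String) : Decidable (Spec_cek_keturunan family_tree parent child out) := by unfold Spec_cek_keturunan; infer_instance

-- ===== CLAIM (what is proved, stated in full; the proofs are below) =====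
def Claim_equal_cek_keturunan : Prop := ∀ (family_tree : List (String × List String)) (parent : String) (child : String), Dom_cek_keturunan family_tree parent child → Spec_cek_keturunan family_tree parent child (cek_keturunan family_tree parent child)

-- ===== LEMMAS AND PROOFS =====

-- successor lists, the edge relation and reachability of the family tree
def pvSucc (family_tree : List (String × List String)) (x : String) : List String :=
  (PySem.Dict.mk family_tree).getD x []

def pvReach (family_tree : List (String × List String)) (x y : String) : Prop :=
  Relation.ReflTransGen (fun a b => b ∈ pvSucc family_tree a) x y

-- number of not-yet-visited names (the decreasing measure of A's recursion)
def pvCnt (family_tree : List (String × List String)) (parent : String) (vis : List String) : Nat :=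
  ((pvUniv family_tree parent).filter (fun x => x ∉ vis)).length

-- potential of B's loop state (the decreasing measure of B's loop)
def pvPhi (family_tree : List (String × List String)) (parent : String)
    (vis : List String) (stack : List String) : Nat :=
  stack.length + (((pvUniv family_tree parent).filter (fun x => x ∉ vis)).map
    (fun x => 1 + (pvSucc family_tree x).length)).sum

theorem pvSet_add_of_not_mem {x : String} {s : PySem.Set String} (h : x ∉ s) :
    PySem.Set.add s x = s ++ [x] := by
  simp [PySem.Set.add, PySem.Set.contains, h]

theorem pvSucc_subset_flatten {family_tree : List (String × List String)} {x y : String}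
    (h : y ∈ pvSucc family_tree x) : y ∈ ((PySem.Dict.mk family_tree).values).flatten := by
  unfold pvSucc at h
  cases hg : (PySem.Dict.mk family_tree).get? x with
  | none => rw [PySem.Dict.getD_of_get?_eq_none _ _ hg] at h; simp at h
  | some l =>
    rw [PySem.Dict.getD_of_get?_eq_some _ _ hg] at h
    have hmem := PySem.Dict.mem_items_of_get?_eq_some _ hg
    exact List.mem_flatten.mpr ⟨l, List.mem_map_of_mem hmem, h⟩

theorem pvSucc_subset_univ {family_tree : List (String × List String)} {parent x y : String}
    (h : y ∈ pvSucc family_tree x) : y ∈ pvUniv family_tree parent := by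
  unfold pvUniv
  rw [PySem.Set.mem_ofList]
  exact List.mem_cons_of_mem _ (List.mem_append_right _ (pvSucc_subset_flatten h))

theorem pvParent_mem_univ (family_tree : List (String × List String)) (parent : String) :
    parent ∈ pvUniv family_tree parent := by
  unfold pvUniv; rw [PySem.Set.mem_ofList]; exact List.mem_cons_self

theorem pvUniv_nodup (family_tree : List (String × List String)) (parent : String) :
    (pvUniv family_tree parent).Nodup := by
  exact PySem.Set.nodup_ofList _

theorem pvReach_mem_flatten {family_tree : List (String × List String)} {a child : String}
    (h : pvReach family_tree a child) (hne : a ≠ child) :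
    child ∈ ((PySem.Dict.mk family_tree).values).flatten := by
  rcases h.cases_tail with rfl | ⟨b, _, hstep⟩
  · exact absurd rfl hne
  · exact pvSucc_subset_flatten hstep

theorem pvReach_closed {family_tree : List (String × List String)} {V : List String} {a b : String}
    (h : pvReach family_tree a b) (ha : a ∈ V)
    (hcl : ∀ x ∈ V, ∀ y ∈ pvSucc family_tree x, y ∈ V) : b ∈ V := by
  induction h with
  | refl => exact ha
  | tail _ h2 ih => exact hcl _ ih _ h2

theorem pvCnt_mono {family_tree : List (String × List String)} {parent : String}
    {vis vis' : List String} (h : ∀ x ∈ vis, x ∈ vis') :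
    pvCnt family_tree parent vis' ≤ pvCnt family_tree parent vis := by
  apply List.Sublist.length_le
  apply List.monotone_filter_right
  intro a ha
  simp only [decide_eq_true_eq] at ha ⊢
  intro hx; exact ha (h _ hx)

-- sum over the unvisited names after marking cur, for any weight g
theorem pvSum_erase {vis : List String} {cur : String} (g : String → Nat) :
    ∀ (l : List String), l.Nodup → cur ∈ l → cur ∉ vis →
    ((l.filter (fun x => x ∉ vis ++ [cur])).map g).sum + g cur
      = ((l.filter (fun x => x ∉ vis)).map g).sum := by
  intro l
  induction l with
  | nil => intro _ h; simp at h
  | cons a l ih =>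
    intro hnd hc hq
    rcases List.nodup_cons.mp hnd with ⟨hal, hlnd⟩
    by_cases hac : a = cur
    · subst hac
      have h1 : (decide (a ∉ vis ++ [a])) = false := by simp
      have h2 : (decide (a ∉ vis)) = true := by simp [hq]
      rw [List.filter_cons, List.filter_cons, h1, h2]
      have hfc : (l.filter (fun x => x ∉ vis ++ [a])) = (l.filter (fun x => x ∉ vis)) := by
        apply List.filter_congr
        intro x hx
        have : x ≠ a := fun hxa => hal (hxa ▸ hx)
        simp [this]
      rw [hfc]; simp [List.map_cons]; omega
    · have hcl : cur ∈ l := by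
        rcases List.mem_cons.mp hc with h | h
        · exact absurd h.symm hac
        · exact h
      have heq : (decide (a ∉ vis ++ [cur])) = (decide (a ∉ vis)) := by
        simp [hac]
      rcases Bool.eq_false_or_eq_true (decide (a ∉ vis)) with hd | hd
      · simp only [List.filter_cons, heq, hd, if_true, List.map_cons, List.sum_cons]
        have := ih hlnd hcl hq
        omega
      · simp only [List.filter_cons, heq, hd, Bool.false_eq_true, if_false]
        exact ih hlnd hcl hq

theorem pvCnt_strict {family_tree : List (String × List String)} {parent : String}
    {vis : List String} {cur : String} (hU : cur ∈ pvUniv family_tree parent) (hv : cur ∉ vis) :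
    pvCnt family_tree parent (vis ++ [cur]) < pvCnt family_tree parent vis := by
  have h := pvSum_erase (fun _ => 1) (pvUniv family_tree parent)
    (pvUniv_nodup family_tree parent) hU hv
  unfold pvCnt
  simp only [List.map_const', List.sum_replicate, smul_eq_mul, mul_one] at h
  omega

-- ---- A-side lemmas ----

theorem pvFoldA_keep_true (family_tree : List (String × List String)) (child : String) (f : Nat) :
    ∀ (l : List String) (st : Bool × PySem.Set String), st.1 = true →
      l.foldl (fun st k => if st.1 then st else if k ∈ st.2 then st
        else pvDfsA family_tree child f st.2 k) st = st := by
  intro l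
  induction l with
  | nil => intro st _; rfl
  | cons k l ih =>
    intro st hst
    rw [List.foldl_cons]
    have hb : (if st.1 then st else if k ∈ st.2 then st
        else pvDfsA family_tree child f st.2 k) = st := by rw [if_pos hst]
    rw [hb]
    exact ih st hst

theorem pvFoldA_sound (family_tree : List (String × List String)) (child : String) (f : Nat)
    (hrec : ∀ (vis : PySem.Set String) (k : String),
      (pvDfsA family_tree child f vis k).1 = true → pvReach family_tree k child) :
    ∀ (l : List String) (st : Bool × PySem.Set String),
      (l.foldl (fun st k => if st.1 then st else if k ∈ st.2 then st
        else pvDfsA family_tree child f st.2 k) st).1 = true →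
      st.1 = true ∨ ∃ k ∈ l, pvReach family_tree k child := by
  intro l
  induction l with
  | nil => intro st h; left; exact h
  | cons k l ih =>
    intro st h
    rw [List.foldl_cons] at h
    rcases ih _ h with h1 | ⟨k', hk', hr⟩
    · by_cases hst : st.1 = true
      · left; exact hst
      · rw [if_neg hst] at h1
        by_cases hk : k ∈ st.2
        · rw [if_pos hk] at h1; exact absurd h1 hst
        · rw [if_neg hk] at h1
          right; exact ⟨k, List.mem_cons_self, hrec _ _ h1⟩
    · right; exact ⟨k', List.mem_cons_of_mem _ hk', hr⟩

theorem pvDfsA_sound (family_tree : List (String × List String)) (child : String) :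
    ∀ (f : Nat) (vis : PySem.Set String) (cur : String),
      (pvDfsA family_tree child f vis cur).1 = true → pvReach family_tree cur child := by
  intro f
  induction f with
  | zero => intro vis cur h; simp [pvDfsA] at h
  | succ f ihf =>
    intro vis cur h
    rw [pvDfsA] at h
    by_cases hguard : cur = child ∧ ((PySem.Dict.mk family_tree).contains cur = true
        ∨ cur ∈ ((PySem.Dict.mk family_tree).values).flatten)
    · rcases hguard with ⟨rfl, _⟩; exact Relation.ReflTransGen.refl
    · rw [if_neg hguard] at h
      cases hg : (PySem.Dict.mk family_tree).get? cur with
      | none => rw [hg] at h; simp at h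
      | some children =>
        rw [hg] at h
        rcases pvFoldA_sound family_tree child f ihf children _ h with h1 | ⟨k, hk, hr⟩
        · simp at h1
        · refine Relation.ReflTransGen.head ?_ hr
          unfold pvSucc
          rw [PySem.Dict.getD_of_get?_eq_some _ _ hg]
          exact hk

theorem pvFoldA_false (family_tree : List (String × List String)) (child parent : String) (f : Nat)
    (hrec : ∀ (vis : PySem.Set String) (cur : String),
      cur ∈ pvUniv family_tree parent → cur ∉ vis → pvCnt family_tree parent vis < f →
      (pvDfsA family_tree child f vis cur).1 = false →
      (∀ x ∈ vis, x ∈ (pvDfsA family_tree child f vis cur).2) ∧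
      cur ∈ (pvDfsA family_tree child f vis cur).2 ∧
      (∀ x ∈ (pvDfsA family_tree child f vis cur).2, x ∉ vis →
        x ≠ child ∧ ∀ y ∈ pvSucc family_tree x, y ∈ (pvDfsA family_tree child f vis cur).2)) :
    ∀ (l : List String) (vis0 : PySem.Set String),
      (∀ k ∈ l, k ∈ pvUniv family_tree parent) → pvCnt family_tree parent vis0 < f →
      (l.foldl (fun st k => if st.1 then st else if k ∈ st.2 then st
        else pvDfsA family_tree child f st.2 k) (false, vis0)).1 = false →
      (∀ x ∈ vis0, x ∈ (l.foldl (fun st k => if st.1 then st else if k ∈ st.2 then st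
        else pvDfsA family_tree child f st.2 k) (false, vis0)).2) ∧
      (∀ k ∈ l, k ∈ (l.foldl (fun st k => if st.1 then st else if k ∈ st.2 then st
        else pvDfsA family_tree child f st.2 k) (false, vis0)).2) ∧
      (∀ x ∈ (l.foldl (fun st k => if st.1 then st else if k ∈ st.2 then st
        else pvDfsA family_tree child f st.2 k) (false, vis0)).2, x ∉ vis0 →
        x ≠ child ∧ ∀ y ∈ pvSucc family_tree x, y ∈ (l.foldl (fun st k => if st.1 then st
          else if k ∈ st.2 then st else pvDfsA family_tree child f st.2 k) (false, vis0)).2) := by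
  intro l
  induction l with
  | nil =>
    intro vis0 _ _ _
    exact ⟨fun x hx => hx, fun k hk => absurd hk (List.not_mem_nil),
      fun x hx hnx => absurd hx hnx⟩
  | cons k l ih =>
    intro vis0 hU hcnt hfalse
    rw [List.foldl_cons] at hfalse ⊢
    have hb : (if (false, vis0).1 then (false, vis0) else if k ∈ (false, vis0).2 then (false, vis0)
        else pvDfsA family_tree child f (false, vis0).2 k)
        = if k ∈ vis0 then (false, vis0) else pvDfsA family_tree child f vis0 k := by
      simp
    rw [hb] at hfalse ⊢
    by_cases hk : k ∈ vis0
    · rw [if_pos hk] at hfalse ⊢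
      obtain ⟨m1, m2, m3⟩ := ih vis0 (fun k' h => hU k' (List.mem_cons_of_mem _ h)) hcnt hfalse
      refine ⟨m1, ?_, m3⟩
      intro k' hk'
      rcases List.mem_cons.mp hk' with rfl | h
      · exact m1 _ hk
      · exact m2 _ h
    · rw [if_neg hk] at hfalse ⊢
      rcases hres : pvDfsA family_tree child f vis0 k with ⟨b, v⟩
      rw [hres] at hfalse
      cases b with
      | true =>
        rw [pvFoldA_keep_true family_tree child f l (true, v) rfl] at hfalse
        simp at hfalse
      | false =>
        have hrk := hrec vis0 k (hU k List.mem_cons_self) hk hcnt (by rw [hres])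
        rw [hres] at hrk
        dsimp only at hrk
        obtain ⟨r1, r2, r3⟩ := hrk
        have hcnt2 : pvCnt family_tree parent v < f :=
          Nat.lt_of_le_of_lt (pvCnt_mono r1) hcnt
        obtain ⟨m1, m2, m3⟩ := ih v (fun k' h => hU k' (List.mem_cons_of_mem _ h)) hcnt2 hfalse
        refine ⟨fun x hx => m1 _ (r1 x hx), ?_, ?_⟩
        · intro k' hk'
          rcases List.mem_cons.mp hk' with rfl | h
          · exact m1 _ r2
          · exact m2 _ h
        · intro x hx hnx
          by_cases hxv : x ∈ v
          · obtain ⟨hne2, hsucc⟩ := r3 x hxv hnx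
            exact ⟨hne2, fun y hy => m1 _ (hsucc y hy)⟩
          · exact m3 x hx hxv

theorem pvDfsA_false (family_tree : List (String × List String)) (child parent : String)
    (hm : (PySem.Dict.mk family_tree).contains child = true
        ∨ child ∈ ((PySem.Dict.mk family_tree).values).flatten) :
    ∀ (f : Nat) (vis : PySem.Set String) (cur : String),
      cur ∈ pvUniv family_tree parent → cur ∉ vis → pvCnt family_tree parent vis < f →
      (pvDfsA family_tree child f vis cur).1 = false →
      (∀ x ∈ vis, x ∈ (pvDfsA family_tree child f vis cur).2) ∧
      cur ∈ (pvDfsA family_tree child f vis cur).2 ∧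
      (∀ x ∈ (pvDfsA family_tree child f vis cur).2, x ∉ vis →
        x ≠ child ∧ ∀ y ∈ pvSucc family_tree x, y ∈ (pvDfsA family_tree child f vis cur).2) := by
  intro f
  induction f with
  | zero => intro vis cur _ _ hcnt _; exact absurd hcnt (Nat.not_lt_zero _)
  | succ f ihf =>
    intro vis cur hcurU hcurvis hcnt hfalse
    rw [pvDfsA] at hfalse ⊢
    by_cases hguard : cur = child ∧ ((PySem.Dict.mk family_tree).contains cur = true
        ∨ cur ∈ ((PySem.Dict.mk family_tree).values).flatten)
    · rw [if_pos hguard] at hfalse; simp at hfalse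
    · rw [if_neg hguard] at hfalse ⊢
      have hne : cur ≠ child := by
        intro hEq; exact hguard ⟨hEq, hEq ▸ hm⟩
      have hadd : PySem.Set.add vis cur = vis ++ [cur] := pvSet_add_of_not_mem hcurvis
      cases hg : (PySem.Dict.mk family_tree).get? cur with
      | none =>
        rw [hg] at hfalse; dsimp only at hfalse ⊢
        rw [hadd]
        refine ⟨fun x hx => List.mem_append_left _ hx,
          List.mem_append_right _ (List.mem_singleton.mpr rfl), ?_⟩
        intro x hx hnx
        have hxc : x = cur := by
          rcases List.mem_append.mp hx with h | h
          · exact absurd h hnx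
          · exact List.mem_singleton.mp h
        subst hxc
        refine ⟨hne, ?_⟩
        intro y hy
        unfold pvSucc at hy
        rw [PySem.Dict.getD_of_get?_eq_none _ _ hg] at hy
        simp at hy
      | some children =>
        rw [hg] at hfalse; dsimp only at hfalse ⊢
        rw [hadd] at hfalse ⊢
        have hchU : ∀ k ∈ children, k ∈ pvUniv family_tree parent := by
          intro k hk
          apply pvSucc_subset_univ (x := cur)
          unfold pvSucc
          rw [PySem.Dict.getD_of_get?_eq_some _ _ hg]
          exact hk
        have hcnt1 : pvCnt family_tree parent (vis ++ [cur]) < f := by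
          have := pvCnt_strict (family_tree := family_tree) hcurU hcurvis
          omega
        obtain ⟨m1, m2, m3⟩ := pvFoldA_false family_tree child parent f
          ihf children (vis ++ [cur]) hchU hcnt1 hfalse
        refine ⟨fun x hx => m1 _ (List.mem_append_left _ hx),
          m1 _ (List.mem_append_right _ (List.mem_singleton.mpr rfl)), ?_⟩
        intro x hx hnx
        by_cases hx1 : x ∈ vis ++ [cur]
        · have hxc : x = cur := by
            rcases List.mem_append.mp hx1 with h | h
            · exact absurd h hnx
            · exact List.mem_singleton.mp h
          subst hxc
          refine ⟨hne, ?_⟩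
          intro y hy
          unfold pvSucc at hy
          rw [PySem.Dict.getD_of_get?_eq_some _ _ hg] at hy
          exact m2 _ hy
        · exact m3 x hx hx1

-- ---- B-side lemmas ----

theorem pvLoopB_sound (family_tree : List (String × List String)) (child : String) :
    ∀ (f : Nat) (vis : PySem.Set String) (stack : List String),
      pvLoopB family_tree child f vis stack = true →
      ∃ x ∈ stack, pvReach family_tree x child := by
  intro f
  induction f with
  | zero => intro vis stack h; simp [pvLoopB] at h
  | succ f ihf =>
    intro vis stack h
    cases stack with
    | nil => simp [pvLoopB] at h
    | cons cur rest =>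
      rw [pvLoopB] at h
      by_cases hc : cur = child
      · exact ⟨cur, List.mem_cons_self, hc ▸ Relation.ReflTransGen.refl⟩
      · rw [if_neg hc] at h
        by_cases hv : cur ∈ vis
        · rw [if_pos hv] at h
          obtain ⟨x, hx, hr⟩ := ihf _ _ h
          exact ⟨x, List.mem_cons_of_mem _ hx, hr⟩
        · rw [if_neg hv] at h
          obtain ⟨x, hx, hr⟩ := ihf _ _ h
          rcases List.mem_append.mp hx with hx1 | hx2
          · refine ⟨cur, List.mem_cons_self, Relation.ReflTransGen.head ?_ hr⟩
            exact List.mem_reverse.mp hx1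
          · exact ⟨x, List.mem_cons_of_mem _ hx2, hr⟩

theorem pvLoopB_false (family_tree : List (String × List String)) (child parent : String) :
    ∀ (f : Nat) (vis : PySem.Set String) (stack : List String),
      (∀ x ∈ stack, x ∈ pvUniv family_tree parent) → child ∉ vis →
      (∀ x ∈ vis, ∀ y ∈ pvSucc family_tree x, y ∈ vis ∨ y ∈ stack) →
      pvPhi family_tree parent vis stack ≤ f →
      pvLoopB family_tree child f vis stack = false →
      ∃ V : List String, (∀ x ∈ vis, x ∈ V) ∧ (∀ x ∈ stack, x ∈ V) ∧
        (∀ x ∈ V, ∀ y ∈ pvSucc family_tree x, y ∈ V) ∧ child ∉ V := by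
  intro f
  induction f with
  | zero =>
    intro vis stack _ hchild hinv hphi _
    have hstack : stack = [] := by
      have : stack.length = 0 := by unfold pvPhi at hphi; omega
      exact List.eq_nil_of_length_eq_zero this
    subst hstack
    refine ⟨vis, fun x hx => hx, fun x hx => absurd hx List.not_mem_nil, ?_, hchild⟩
    intro x hx y hy
    rcases hinv x hx y hy with h | h
    · exact h
    · exact absurd h List.not_mem_nil
  | succ f ihf =>
    intro vis stack hstackU hchild hinv hphi hfalse
    cases stack with
    | nil =>
      refine ⟨vis, fun x hx => hx, fun x hx => absurd hx List.not_mem_nil, ?_, hchild⟩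
      intro x hx y hy
      rcases hinv x hx y hy with h | h
      · exact h
      · exact absurd h List.not_mem_nil
    | cons cur rest =>
      rw [pvLoopB] at hfalse
      by_cases hc : cur = child
      · rw [if_pos hc] at hfalse; simp at hfalse
      · rw [if_neg hc] at hfalse
        by_cases hv : cur ∈ vis
        · rw [if_pos hv] at hfalse
          obtain ⟨V, v1, v2, v3, v4⟩ := ihf vis rest
            (fun x hx => hstackU x (List.mem_cons_of_mem _ hx)) hchild
            (by
              intro x hx y hy
              rcases hinv x hx y hy with h | h
              · exact Or.inl h
              · rcases List.mem_cons.mp h with rfl | h2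
                · exact Or.inl hv
                · exact Or.inr h2)
            (by
              unfold pvPhi at hphi ⊢
              simp only [List.length_cons] at hphi
              omega) hfalse
          refine ⟨V, v1, ?_, v3, v4⟩
          intro x hx
          rcases List.mem_cons.mp hx with rfl | h
          · exact v1 _ hv
          · exact v2 _ h
        · rw [if_neg hv] at hfalse
          rw [pvSet_add_of_not_mem hv] at hfalse
          have hcurU : cur ∈ pvUniv family_tree parent := hstackU cur List.mem_cons_self
          obtain ⟨V, v1, v2, v3, v4⟩ := ihf (vis ++ [cur])
            (((PySem.Dict.mk family_tree).getD cur []).reverse ++ rest)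
            (by
              intro x hx
              rcases List.mem_append.mp hx with h | h
              · exact pvSucc_subset_univ (x := cur) (List.mem_reverse.mp h)
              · exact hstackU x (List.mem_cons_of_mem _ h))
            (by
              intro h
              rcases List.mem_append.mp h with h | h
              · exact hchild h
              · exact hc (List.mem_singleton.mp h).symm)
            (by
              intro x hx y hy
              rcases List.mem_append.mp hx with hxv | hxc
              · rcases hinv x hxv y hy with h | h
                · exact Or.inl (List.mem_append_left _ h)
                · rcases List.mem_cons.mp h with rfl | h2
                  · exact Or.inl (List.mem_append_right _ (List.mem_singleton.mpr rfl))
                  · exact Or.inr (List.mem_append_right _ h2)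
              · have hxcur : x = cur := List.mem_singleton.mp hxc
                subst hxcur
                exact Or.inr (List.mem_append_left _ (List.mem_reverse.mpr hy)))
            (by
              have herase := pvSum_erase (vis := vis) (cur := cur)
                (fun x => 1 + (pvSucc family_tree x).length) (pvUniv family_tree parent)
                (pvUniv_nodup family_tree parent) hcurU hv
              dsimp only at herase
              have hlen : ((PySem.Dict.mk family_tree).getD cur []).length
                  = (pvSucc family_tree cur).length := rfl
              unfold pvPhi at hphi ⊢
              simp only [List.length_cons, List.length_append, List.length_reverse] at hphi ⊢
              rw [hlen]
              omega) hfalse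
          refine ⟨V, fun x hx => v1 _ (List.mem_append_left _ hx), ?_, v3, v4⟩
          intro x hx
          rcases List.mem_cons.mp hx with rfl | h
          · exact v1 _ (List.mem_append_right _ (List.mem_singleton.mpr rfl))
          · exact v2 _ (List.mem_append_right _ h)

-- ---- the bridge ----

theorem pvMain (family_tree : List (String × List String)) (parent child : String)
    (hne : parent ≠ child) :
    (pvDfsA family_tree child ((pvUniv family_tree parent).length + 1) PySem.Set.empty parent).1
      = pvLoopB family_tree child (pvFuelB family_tree parent) PySem.Set.empty [parent] := by
  have hemp : ∀ x : String, x ∉ (PySem.Set.empty : PySem.Set String) := by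
    intro x hx
    simp [PySem.Set.empty] at hx
  have hcnt0 : pvCnt family_tree parent PySem.Set.empty = (pvUniv family_tree parent).length := by
    unfold pvCnt
    have : ∀ x ∈ pvUniv family_tree parent,
        (decide (x ∉ (PySem.Set.empty : PySem.Set String))) = true := by
      intro x _
      simp [PySem.Set.empty]
    rw [List.filter_eq_self.mpr this]
  by_cases hreach : pvReach family_tree parent child
  · have hm : (PySem.Dict.mk family_tree).contains child = true
        ∨ child ∈ ((PySem.Dict.mk family_tree).values).flatten :=
      Or.inr (pvReach_mem_flatten hreach hne)
    have hA : (pvDfsA family_tree child ((pvUniv family_tree parent).length + 1)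
        PySem.Set.empty parent).1 = true := by
      rcases Bool.eq_false_or_eq_true (pvDfsA family_tree child
          ((pvUniv family_tree parent).length + 1) PySem.Set.empty parent).1 with hT | hF
      · exact hT
      · exfalso
        obtain ⟨_, hcur, hdelta⟩ := pvDfsA_false family_tree child parent hm
          ((pvUniv family_tree parent).length + 1) PySem.Set.empty parent
          (pvParent_mem_univ family_tree parent) (hemp parent) (by omega) hF
        have hclosed : ∀ x ∈ (pvDfsA family_tree child
            ((pvUniv family_tree parent).length + 1) PySem.Set.empty parent).2,
            ∀ y ∈ pvSucc family_tree x, y ∈ (pvDfsA family_tree child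
            ((pvUniv family_tree parent).length + 1) PySem.Set.empty parent).2 :=
          fun x hx => (hdelta x hx (hemp x)).2
        have hchildV := pvReach_closed hreach hcur hclosed
        exact (hdelta child hchildV (hemp child)).1 rfl
    have hB : pvLoopB family_tree child (pvFuelB family_tree parent)
        PySem.Set.empty [parent] = true := by
      rcases Bool.eq_false_or_eq_true (pvLoopB family_tree child (pvFuelB family_tree parent)
          PySem.Set.empty [parent]) with hT | hF
      · exact hT
      · exfalso
        obtain ⟨V, _, v2, v3, v4⟩ := pvLoopB_false family_tree child parent
          (pvFuelB family_tree parent) PySem.Set.empty [parent]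
          (by
            intro x hx
            have : x = parent := List.mem_singleton.mp hx
            exact this ▸ pvParent_mem_univ family_tree parent)
          (hemp child)
          (by
            intro x hx
            exact absurd hx (hemp x))
          (by
            unfold pvPhi pvFuelB
            have : ∀ x ∈ pvUniv family_tree parent,
                (decide (x ∉ (PySem.Set.empty : PySem.Set String))) = true := by
              intro x _
              simp [PySem.Set.empty]
            rw [List.filter_eq_self.mpr this]
            unfold pvSucc
            simp) hF
        exact v4 (pvReach_closed hreach (v2 parent List.mem_cons_self) v3)
    rw [hA, hB]
  · have hA : (pvDfsA family_tree child ((pvUniv family_tree parent).length + 1)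
        PySem.Set.empty parent).1 = false := by
      rcases Bool.eq_false_or_eq_true (pvDfsA family_tree child
          ((pvUniv family_tree parent).length + 1) PySem.Set.empty parent).1 with hT | hF
      · exact absurd (pvDfsA_sound family_tree child _ _ _ hT) hreach
      · exact hF
    have hB : pvLoopB family_tree child (pvFuelB family_tree parent)
        PySem.Set.empty [parent] = false := by
      rcases Bool.eq_false_or_eq_true (pvLoopB family_tree child (pvFuelB family_tree parent)
          PySem.Set.empty [parent]) with hT | hF
      · exfalso
        obtain ⟨x, hx, hr⟩ := pvLoopB_sound family_tree child _ _ _ hT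
        have : x = parent := List.mem_singleton.mp hx
        exact hreach (this ▸ hr)
      · exact hF
    rw [hA, hB]

-- ===== VERDICT (by name: the statement is the Claim_ definition above) =====
theorem cek_keturunan_spec : Claim_equal_cek_keturunan := by
  intro family_tree parent child _dom
  unfold Spec_cek_keturunan cek_keturunan cek_keturunan_alt
  by_cases hpc : parent = child
  · simp [hpc]
  · simp only [hpc, if_false]
    rw [pvMain family_tree parent child hpc]
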